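-- pv_equiv track=rewrite | github.com/VladislavBulanov/Python_Basic_2 | Module19/09_pedigree/main.py | get_depth_information
-- ===== SOURCE A (Python) =====
-- def get_depth_information(source_pedigree):
--     result_depth = dict()
--
--     for child, parent in source_pedigree.items():
--         result_depth[child], result_depth[parent] = 0, 0
--
--     for human in source_pedigree:
--         current_human = human
--         # Если человек есть в родословной в качестве
--         # потомка (ключа словаря), мы берём его родителя и
--         # рассматриваем уже его в качестве потомка:
--         while current_human in source_pedigree:
--             current_human = source_pedigree[current_human]
--             result_depth[human] += 1
--
--     return result_depth
-- ===== SOURCE B (Python) =====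
-- def get_depth_information(source_pedigree):
--     # Memoized alternative: each person's depth is computed once by walking
--     # the not-yet-memoized part of its ancestor chain and filling the cache
--     # back-to-front.
--     memo = {}
--
--     def depth(person):
--         chain = []
--         while person in source_pedigree and person not in memo:
--             chain.append(person)
--             person = source_pedigree[person]
--         d = memo.get(person, 0)
--         while chain:
--             d += 1
--             memo[chain.pop()] = d
--         return d
--
--     result = {}
--     for child, parent in source_pedigree.items():
--         if child not in result:
--             result[child] = depth(child)
--         if parent not in result:
--             result[parent] = depth(parent)
--     return result
-- ===== Notes on version B (the rewrite author's own statement) =====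
-- stated objective: alternative
-- what changed: A re-walks the full ancestor chain from every person; B computes each depth once via a memo cache filled back-to-front along each chain, so each parent edge is resolved from the cache after its first traversal.
import Mathlib
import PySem

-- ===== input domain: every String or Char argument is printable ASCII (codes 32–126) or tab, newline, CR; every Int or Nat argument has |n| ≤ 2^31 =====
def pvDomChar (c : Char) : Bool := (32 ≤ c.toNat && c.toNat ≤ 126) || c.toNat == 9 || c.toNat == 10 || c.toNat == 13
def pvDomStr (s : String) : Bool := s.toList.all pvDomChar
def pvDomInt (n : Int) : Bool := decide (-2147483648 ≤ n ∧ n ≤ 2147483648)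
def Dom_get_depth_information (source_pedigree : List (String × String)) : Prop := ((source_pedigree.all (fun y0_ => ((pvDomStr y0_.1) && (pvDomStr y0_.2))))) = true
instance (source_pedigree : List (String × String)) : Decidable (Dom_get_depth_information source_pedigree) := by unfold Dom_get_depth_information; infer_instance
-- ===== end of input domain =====

-- B replaces A's per-person re-walk of the whole ancestor chain by a memoized walk that
-- fills a depth cache back-to-front (an alternative strategy of different shape, not measured faster).


-- ===== PORT A =====
-- 'while current_human in source_pedigree: current_human = source_pedigree[current_human]; result_depth[human] += 1'
-- (fuel-bounded; under Pre_ every chain ends within src.length steps, so fuel src.length + 1 is never exhausted;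
--  'result_depth[human] += 1' is exact because human is always a key of result_depth after the first loop)
def pvWhileA (src : List (String × String)) : Nat → String → String → PySem.Dict String Int → PySem.Dict String Int
  | 0, _, _, d => d
  | f + 1, cur, human, d =>
    match List.lookup cur src with
    | some p => pvWhileA src f p human (d.insert human (d.getD human 0 + 1))
    | none => d

def get_depth_information (source_pedigree : List (String × String)) : List (String × Int) :=
  let rd0 : PySem.Dict String Int :=
    source_pedigree.foldl (fun d cp => (d.insert cp.1 0).insert cp.2 0) PySem.Dict.empty
  let rd := source_pedigree.foldl
    (fun d cp => pvWhileA source_pedigree (source_pedigree.length + 1) cp.1 cp.1 d) rd0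
  rd.items

-- ===== PORT B =====
-- first while loop of depth(): collect the not-yet-memoized chain and the person it stops at
def pvChainB (src : List (String × String)) : Nat → PySem.Dict String Int → String → List String × String
  | 0, _, cur => ([], cur)
  | f + 1, memo, cur =>
    match List.lookup cur src with
    | none => ([], cur)
    | some q =>
      if memo.contains cur then ([], cur)
      else
        let r := pvChainB src f memo q
        (cur :: r.1, r.2)

-- second while loop of depth(): 'while chain: d += 1; memo[chain.pop()] = d'
def pvDepthStep (st : Int × PySem.Dict String Int) (person : String) : Int × PySem.Dict String Int :=
  (st.1 + 1, st.2.insert person (st.1 + 1))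

def pvDepthB (src : List (String × String)) (fuel : Nat) (memo : PySem.Dict String Int)
    (p : String) : Int × PySem.Dict String Int :=
  let cl := pvChainB src fuel memo p
  cl.1.reverse.foldl pvDepthStep (memo.getD cl.2 0, memo)

-- one 'if person not in result: result[person] = depth(person)' step, state = (result, memo)
def pvResStep (src : List (String × String))
    (st : PySem.Dict String Int × PySem.Dict String Int) (person : String) :
    PySem.Dict String Int × PySem.Dict String Int :=
  if st.1.contains person then st
  else
    let r := pvDepthB src (src.length + 1) st.2 person
    (st.1.insert person r.1, r.2)

def get_depth_information_alt (source_pedigree : List (String × String)) : List (String × Int) :=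
  (source_pedigree.foldl
    (fun st cp => pvResStep source_pedigree (pvResStep source_pedigree st cp.1) cp.2)
    (PySem.Dict.empty, PySem.Dict.empty)).1.items

-- ===== PRECONDITION & SPEC =====
-- the parent map of the pedigree (a person that is no child is a fixed point)
def pvParent (src : List (String × String)) (p : String) : String :=
  (List.lookup p src).getD p

-- Pre_ excludes cyclic pedigrees, on which A's while loop diverges (never returns), and lists with
-- duplicate child keys, which cannot occur in the Python dict argument (the association list stands for a dict).
-- Acyclicity is stated as: iterating the parent map length-many times from any child leaves the child set.
def Pre_get_depth_information (source_pedigree : List (String × String)) : Prop :=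
  (source_pedigree.map Prod.fst).Nodup ∧
  ∀ cp ∈ source_pedigree,
    (pvParent source_pedigree)^[source_pedigree.length] cp.1 ∉ source_pedigree.map Prod.fst

instance (source_pedigree : List (String × String)) : Decidable (Pre_get_depth_information source_pedigree) := by
  unfold Pre_get_depth_information; infer_instance

def pvWitness_get_depth_information : (List (String × String)) := [("a", "b"), ("b", "c")]

def Spec_get_depth_information (source_pedigree : List (String × String)) (out : List (String × Int)) : Prop := out = get_depth_information_alt source_pedigree
instance (source_pedigree : List (String × String)) (out : List (String × Int)) : Decidable (Spec_get_depth_information source_pedigree out) := by unfold Spec_get_depth_information; infer_instance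

-- ===== CLAIM (what is proved, stated in full; the proofs are below) =====
def Claim_equal_get_depth_information : Prop := ∀ (source_pedigree : List (String × String)), Dom_get_depth_information source_pedigree → Pre_get_depth_information source_pedigree → Spec_get_depth_information source_pedigree (get_depth_information source_pedigree)

-- ===== LEMMAS AND PROOFS =====

-- pvEnds src f p = 'the ancestor chain from p reaches a non-key within f lookups'
def pvEnds (src : List (String × String)) : Nat → String → Bool
  | 0, p => (List.lookup p src).isNone
  | f + 1, p =>
    match List.lookup p src with
    | some q => pvEnds src f q
    | none => true

-- chain-depth value with fuel f (0 when fuel runs out; stable once the chain ends, see pvVal_stable)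
def pvVal (src : List (String × String)) : Nat → String → Int
  | 0, _ => 0
  | f + 1, p =>
    match List.lookup p src with
    | some q => 1 + pvVal src f q
    | none => 0

-- the value both programs end up storing for person p
def pvValKey (src : List (String × String)) (p : String) : Int :=
  match List.lookup p src with
  | some _ => pvVal src (src.length + 1) p
  | none => 0

theorem pvLookup_isSome_iff_mem {src : List (String × String)} {p : String} :
    (List.lookup p src).isSome = true ↔ p ∈ src.map Prod.fst := by
  induction src with
  | nil => simp [List.lookup]
  | cons cp l ih =>
    obtain ⟨c, q⟩ := cp
    by_cases h : p = c
    · simp [List.lookup, h]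
    · simp [List.lookup, beq_eq_false_iff_ne.mpr h, ih, h]

theorem pvLookup_mem {src : List (String × String)} {p q : String}
    (h : List.lookup p src = some q) : (p, q) ∈ src := by
  induction src with
  | nil => simp [List.lookup] at h
  | cons cp l ih =>
    obtain ⟨c, v⟩ := cp
    by_cases hp : p = c
    · subst hp
      simp [List.lookup] at h
      simp [h]
    · simp [List.lookup, beq_eq_false_iff_ne.mpr hp] at h
      simp [ih h]

theorem pvLookup_of_mem_nodup {src : List (String × String)} {cp : String × String}
    (hnd : (src.map Prod.fst).Nodup) (hm : cp ∈ src) : List.lookup cp.1 src = some cp.2 := by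
  induction src with
  | nil => simp at hm
  | cons hd l ih =>
    obtain ⟨c, v⟩ := hd
    simp only [List.map_cons, List.nodup_cons] at hnd
    rcases List.mem_cons.mp hm with h | h
    · subst h; simp [List.lookup]
    · have hne : cp.1 ≠ c := by
        intro he
        exact hnd.1 (he ▸ (List.mem_map.mpr ⟨cp, h, rfl⟩))
      simp [List.lookup, beq_eq_false_iff_ne.mpr hne, ih hnd.2 h]

theorem pvVal_succ_some {src : List (String × String)} {p q : String} {f : Nat}
    (hl : List.lookup p src = some q) : pvVal src (f + 1) p = 1 + pvVal src f q := by
  simp only [pvVal, hl]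

theorem pvVal_none {src : List (String × String)} {p : String} {f : Nat}
    (hl : List.lookup p src = none) : pvVal src f p = 0 := by
  cases f <;> simp [pvVal, hl]

theorem pvEnds_succ_some {src : List (String × String)} {p q : String} {f : Nat}
    (hl : List.lookup p src = some q) : pvEnds src (f + 1) p = pvEnds src f q := by
  simp only [pvEnds, hl]

theorem pvWhileA_succ_some {src : List (String × String)} {cur q human : String} {f : Nat}
    {d : PySem.Dict String Int} (hl : List.lookup cur src = some q) :
    pvWhileA src (f + 1) cur human d = pvWhileA src f q human (d.insert human (d.getD human 0 + 1)) := by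
  simp only [pvWhileA, hl]

theorem pvWhileA_succ_none {src : List (String × String)} {cur human : String} {f : Nat}
    {d : PySem.Dict String Int} (hl : List.lookup cur src = none) :
    pvWhileA src (f + 1) cur human d = d := by
  simp only [pvWhileA, hl]

theorem pvEnds_mono {src : List (String × String)} :
    ∀ (f g : Nat) (p : String), f ≤ g → pvEnds src f p = true → pvEnds src g p = true := by
  intro f
  induction f with
  | zero =>
    intro g p _ h
    simp only [pvEnds] at h
    have h' := Option.isNone_iff_eq_none.mp h
    cases g with
    | zero => simp only [pvEnds]; exact h
    | succ g' => simp [pvEnds, h']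
  | succ f' ih =>
    intro g p hle h
    cases g with
    | zero => omega
    | succ g' =>
      simp only [pvEnds] at h ⊢
      cases hl : List.lookup p src with
      | none => simp
      | some q =>
        rw [hl] at h
        exact ih g' q (by omega) h

theorem pvEnds_of_none {src : List (String × String)} {p : String}
    (h : List.lookup p src = none) : ∀ f, pvEnds src f p = true := by
  intro f; cases f <;> simp [pvEnds, h]

theorem pvParent_fix {src : List (String × String)} {p : String}
    (h : List.lookup p src = none) : ∀ m, (pvParent src)^[m] p = p := by
  intro m
  induction m with
  | zero => rfl
  | succ m' ih => rw [Function.iterate_succ_apply, pvParent, h, Option.getD_none, ih]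

theorem pvEnds_iff_iterate {src : List (String × String)} :
    ∀ (f : Nat) (p : String),
      pvEnds src f p = true ↔ (pvParent src)^[f] p ∉ src.map Prod.fst := by
  intro f
  induction f with
  | zero =>
    intro p
    rw [Function.iterate_zero, id_eq, ← pvLookup_isSome_iff_mem]
    simp only [pvEnds]
    cases List.lookup p src <;> simp
  | succ f' ih =>
    intro p
    cases hl : List.lookup p src with
    | none =>
      rw [Function.iterate_succ_apply, pvParent, hl, Option.getD_none, pvParent_fix hl f',
        ← pvLookup_isSome_iff_mem, hl]
      simp [pvEnds, hl]
    | some q =>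
      rw [pvEnds_succ_some hl, Function.iterate_succ_apply, pvParent, hl, Option.getD_some]
      exact ih q

theorem pvVal_stable {src : List (String × String)} :
    ∀ (f : Nat) (p : String), pvEnds src f p = true →
      ∀ g, f ≤ g → pvVal src (g + 1) p = pvVal src (f + 1) p := by
  intro f
  induction f with
  | zero =>
    intro p h g _
    simp only [pvEnds] at h
    simp [pvVal, Option.isNone_iff_eq_none.mp h]
  | succ f' ih =>
    intro p h g hle
    simp only [pvEnds] at h
    cases hl : List.lookup p src with
    | none => simp [pvVal, hl]
    | some q =>
      rw [hl] at h
      obtain ⟨g', rfl⟩ : ∃ g', g = g' + 1 := ⟨g - 1, by omega⟩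
      rw [pvVal_succ_some hl, pvVal_succ_some hl, ih q h g' (by omega)]

theorem pvValKey_step {src : List (String × String)} {p q : String}
    (hl : List.lookup p src = some q) (he : pvEnds src src.length p = true) :
    pvValKey src p = 1 + pvValKey src q := by
  have hn : ∃ n', src.length = n' + 1 := by
    cases hsrc : src with
    | nil => rw [hsrc] at hl; simp [List.lookup] at hl
    | cons a l => exact ⟨l.length, by simp⟩
  obtain ⟨n', hn⟩ := hn
  rw [hn] at he
  simp only [pvEnds, hl] at he
  rw [pvValKey, hl]
  cases hq : List.lookup q src with
  | none =>
    rw [pvValKey, hq]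
    rw [pvVal_succ_some hl, pvVal_none hq]
  | some r =>
    rw [pvValKey, hq]
    rw [pvVal_succ_some hl]
    have h1 : pvVal src (src.length) q = pvVal src (src.length + 1) q := by
      rw [hn, pvVal_stable n' q he (n' + 1) (by omega), pvVal_stable n' q he n' (by omega)]
    rw [h1]

theorem pvValKey_of_not_key {src : List (String × String)} {p : String}
    (h : p ∉ src.map Prod.fst) : pvValKey src p = 0 := by
  have : ¬ (List.lookup p src).isSome = true := fun hs => h (pvLookup_isSome_iff_mem.mp hs)
  cases hl : List.lookup p src with
  | none => rw [pvValKey, hl]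
  | some q => rw [hl] at this; simp at this

-- inserting a key's current value is a no-op (keys unique)
theorem pvInsert_self_eq {d : PySem.Dict String Int} {k : String} {v : Int}
    (hnd : d.keys.Nodup) (h : d.get? k = some v) : d.insert k v = d := by
  have hc : d.contains k = true := by rw [PySem.Dict.contains_eq_isSome_get?, h]; rfl
  apply PySem.Dict.ext
  rw [PySem.Dict.items_insert_of_contains _ _ hc]
  conv_rhs => rw [← List.map_id d.items]
  apply List.map_congr_left
  intro p hp
  obtain ⟨p1, p2⟩ := p
  by_cases hpk : p1 = k
  · have hg := PySem.Dict.get?_of_mem_items d hp hnd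
    rw [hpk] at hg
    rw [hg] at h
    injection h with h
    simp [hpk, h]
  · simp [beq_eq_false_iff_ne.mpr hpk, id]

-- the while loop of A adds the chain length of cur to result_depth[human]
theorem pvWhileA_spec {src : List (String × String)} {human : String} :
    ∀ (f : Nat) (cur : String) (d : PySem.Dict String Int),
      pvEnds src f cur = true → d.keys.Nodup → d.contains human = true →
      pvWhileA src (f + 1) cur human d = d.insert human (d.getD human 0 + pvVal src (f + 1) cur) := by
  intro f
  induction f with
  | zero =>
    intro cur d he hnd hc
    simp only [pvEnds] at he
    have hl := Option.isNone_iff_eq_none.mp he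
    rw [pvWhileA_succ_none hl]
    obtain ⟨v, hv⟩ := Option.isSome_iff_exists.mp (show (d.get? human).isSome = true by rw [← PySem.Dict.contains_eq_isSome_get?]; exact hc)
    rw [pvVal_none hl, PySem.Dict.getD_of_get?_eq_some _ _ hv, add_zero]
    exact (pvInsert_self_eq hnd hv).symm
  | succ f' ih =>
    intro cur d he hnd hc
    cases hl : List.lookup cur src with
    | none =>
      rw [pvWhileA_succ_none hl]
      obtain ⟨v, hv⟩ := Option.isSome_iff_exists.mp (show (d.get? human).isSome = true by rw [← PySem.Dict.contains_eq_isSome_get?]; exact hc)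
      rw [pvVal_none hl, PySem.Dict.getD_of_get?_eq_some _ _ hv, add_zero]
      exact (pvInsert_self_eq hnd hv).symm
    | some q =>
      have he' : pvEnds src f' q = true := by rw [← pvEnds_succ_some hl]; exact he
      have hnd' : (d.insert human (d.getD human 0 + 1)).keys.Nodup := by
        rw [PySem.Dict.keys_insert_of_contains _ _ hc]; exact hnd
      have hc' : (d.insert human (d.getD human 0 + 1)).contains human = true := by
        rw [PySem.Dict.contains_insert]; simp
      rw [pvWhileA_succ_some hl, ih q _ he' hnd' hc']
      rw [PySem.Dict.getD_insert_self, PySem.Dict.insert_insert_self, pvVal_succ_some hl]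
      congr 1
      ring

-- A's outer loop: each child key accumulates its chain depth
theorem pvAfold {src : List (String × String)} :
    ∀ (l : List (String × String)) (d : PySem.Dict String Int),
      (∀ cp ∈ l, pvEnds src src.length cp.1 = true) →
      (∀ cp ∈ l, (List.lookup cp.1 src).isSome = true) →
      (∀ cp ∈ l, d.contains cp.1 = true) → d.keys.Nodup →
      (l.foldl (fun d cp => pvWhileA src (src.length + 1) cp.1 cp.1 d) d).keys = d.keys ∧
      ∀ k, (l.foldl (fun d cp => pvWhileA src (src.length + 1) cp.1 cp.1 d) d).getD k 0
             = d.getD k 0 + ((l.map Prod.fst).count k : Int) * pvValKey src k := by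
  intro l
  induction l with
  | nil => intro d _ _ _ _; simp
  | cons cp l' ih =>
    intro d hends hsome hcont hnd
    have hstep : pvWhileA src (src.length + 1) cp.1 cp.1 d
        = d.insert cp.1 (d.getD cp.1 0 + pvValKey src cp.1) := by
      rw [pvWhileA_spec src.length cp.1 d (hends cp (by simp)) hnd (hcont cp (by simp))]
      obtain ⟨q, hq⟩ := Option.isSome_iff_exists.mp (hsome cp (by simp))
      rw [pvValKey, hq]
    have hkeys1 : (d.insert cp.1 (d.getD cp.1 0 + pvValKey src cp.1)).keys = d.keys :=
      PySem.Dict.keys_insert_of_contains _ _ (hcont cp (by simp))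
    have hnd1 : (d.insert cp.1 (d.getD cp.1 0 + pvValKey src cp.1)).keys.Nodup := by
      rw [hkeys1]; exact hnd
    have hcont1 : ∀ cq ∈ l', (d.insert cp.1 (d.getD cp.1 0 + pvValKey src cp.1)).contains cq.1 = true := by
      intro cq hm
      rw [PySem.Dict.contains_insert]
      rw [hcont cq (by simp [hm])]
      simp
    obtain ⟨ihk, ihg⟩ := ih (d.insert cp.1 (d.getD cp.1 0 + pvValKey src cp.1))
      (fun cq hm => hends cq (by simp [hm])) (fun cq hm => hsome cq (by simp [hm])) hcont1 hnd1
    constructor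
    · simp only [List.foldl_cons, hstep]
      rw [ihk, hkeys1]
    · intro k
      simp only [List.foldl_cons, hstep]
      rw [ihg k, PySem.Dict.getD_insert]
      simp only [List.map_cons, List.count_cons]
      by_cases hk : k = cp.1
      · simp only [hk, beq_self_eq_true, if_pos]
        push_cast
        ring
      · rw [if_neg hk, if_neg (by simpa using fun h => hk (by simp [h]))]
        push_cast
        ring

-- a loop doing two updates per pair is the one-update loop over the flattened stream
theorem pvFoldPairsFlat {β : Type} (g : β → String → β) :
    ∀ (l : List (String × String)) (b : β),
      l.foldl (fun d cp => g (g d cp.1) cp.2) b = (l.flatMap fun cp => [cp.1, cp.2]).foldl g b := by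
  intro l
  induction l with
  | nil => intro b; simp
  | cons cp l' ih => intro b; simp [ih]

theorem pvRd0getD {src : List (String × String)} :
    ∀ (l : List String) (d : PySem.Dict String Int), (∀ k, d.getD k 0 = 0) →
      ∀ k, (l.foldl (fun d x => d.insert x (0 : Int)) d).getD k 0 = 0 := by
  intro l
  induction l with
  | nil => intro d h k; exact h k
  | cons x l' ih =>
    intro d h k
    simp only [List.foldl_cons]
    apply ih
    intro k'
    rw [PySem.Dict.getD_insert]
    by_cases hk : k' = x <;> simp [hk, h k']

def pvMemoGood (src : List (String × String)) (memo : PySem.Dict String Int) : Prop :=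
  ∀ k v, memo.get? k = some v → (List.lookup k src).isSome = true ∧ v = pvValKey src k

theorem pvDepthB_spec {src : List (String × String)} :
    ∀ (f : Nat) (p : String) (fuel : Nat) (memo : PySem.Dict String Int),
      pvEnds src f p = true → f ≤ src.length → f < fuel → pvMemoGood src memo →
      (pvDepthB src fuel memo p).1 = pvValKey src p ∧ pvMemoGood src (pvDepthB src fuel memo p).2 := by
  intro f
  induction f with
  | zero =>
    intro p fuel memo he _ hfuel hmg
    obtain ⟨g, rfl⟩ : ∃ g, fuel = g + 1 := ⟨fuel - 1, by omega⟩
    simp only [pvEnds] at he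
    have hl := Option.isNone_iff_eq_none.mp he
    have hget : memo.get? p = none := by
      cases hg : memo.get? p with
      | none => rfl
      | some v => exact absurd ((hmg p v hg).1) (by rw [hl]; simp)
    simp only [pvDepthB, pvChainB, hl, List.reverse_nil, List.foldl_nil]
    rw [PySem.Dict.getD_eq_get?_getD, hget]
    exact ⟨by rw [pvValKey, hl]; rfl, hmg⟩
  | succ f' ih =>
    intro p fuel memo he hle hfuel hmg
    obtain ⟨g, rfl⟩ : ∃ g, fuel = g + 1 := ⟨fuel - 1, by omega⟩
    cases hl : List.lookup p src with
    | none =>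
      have hget : memo.get? p = none := by
        cases hg : memo.get? p with
        | none => rfl
        | some v => exact absurd ((hmg p v hg).1) (by rw [hl]; simp)
      simp only [pvDepthB, pvChainB, hl, List.reverse_nil, List.foldl_nil]
      rw [PySem.Dict.getD_eq_get?_getD, hget]
      exact ⟨by rw [pvValKey, hl]; rfl, hmg⟩
    | some q =>
      have he' : pvEnds src f' q = true := by rw [← pvEnds_succ_some hl]; exact he
      have hen : pvEnds src src.length p = true := pvEnds_mono (f' + 1) src.length p hle he
      by_cases hc : memo.contains p = true
      · obtain ⟨v, hv⟩ := Option.isSome_iff_exists.mp (show (memo.get? p).isSome = true by rw [← PySem.Dict.contains_eq_isSome_get?]; exact hc)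
        simp only [pvDepthB, pvChainB, hl, hc, if_pos, List.reverse_nil, List.foldl_nil]
        rw [PySem.Dict.getD_eq_get?_getD, hv]
        exact ⟨by simp [(hmg p v hv).2], hmg⟩
      · have hrec : pvDepthB src (g + 1) memo p = pvDepthStep (pvDepthB src g memo q) p := by
          simp only [pvDepthB, pvChainB, hl, hc, if_neg, Bool.false_eq_true, not_false_iff]
          simp [List.foldl_append]
        obtain ⟨ih1, ih2⟩ := ih q g memo he' (by omega) (by omega) hmg
        rw [hrec]
        have hval : pvValKey src q + 1 = pvValKey src p := by
          rw [pvValKey_step hl hen]; ring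
        constructor
        · show (pvDepthB src g memo q).1 + 1 = _
          rw [ih1, hval]
        · show pvMemoGood src ((pvDepthB src g memo q).2.insert p ((pvDepthB src g memo q).1 + 1))
          intro k v hk
          rw [PySem.Dict.get?_insert] at hk
          by_cases hkp : k = p
          · rw [if_pos hkp] at hk
            injection hk with hk'
            refine ⟨by rw [hkp, hl]; simp, ?_⟩
            rw [hkp, ← hval, ← ih1, ← hk']
          · rw [if_neg hkp] at hk
            exact ih2 k v hk

-- B's outer loop: the result dict collects each person once, with its correct depth
theorem pvBfold {src : List (String × String)} :
    ∀ (persons : List String) (st : PySem.Dict String Int × PySem.Dict String Int),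
      (∀ x ∈ persons, pvEnds src src.length x = true) →
      pvMemoGood src st.2 → st.1.keys.Nodup →
      (∀ k ∈ st.1.keys, st.1.getD k 0 = pvValKey src k) →
      (persons.foldl (pvResStep src) st).1.keys = PySem.Set.update st.1.keys persons ∧
      (persons.foldl (pvResStep src) st).1.keys.Nodup ∧
      (∀ k ∈ (persons.foldl (pvResStep src) st).1.keys,
        (persons.foldl (pvResStep src) st).1.getD k 0 = pvValKey src k) := by
  intro persons
  induction persons with
  | nil =>
    intro st _ _ hnd hg
    refine ⟨?_, hnd, hg⟩
    simp [PySem.Set.update]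
  | cons x ps ih =>
    intro st hends hmg hnd hg
    have hupd : PySem.Set.update st.1.keys (x :: ps) = PySem.Set.update (PySem.Set.add st.1.keys x) ps :=
      PySem.Set.update_cons _ _ _
    by_cases hc : st.1.contains x = true
    · have hx : x ∈ st.1.keys := (PySem.Dict.contains_iff_mem_keys _ _).mp hc
      have hstep : pvResStep src st x = st := by simp [pvResStep, hc]
      simp only [List.foldl_cons, hstep]
      rw [hupd, PySem.Set.add_of_mem hx]
      exact ih st (fun y hy => hends y (by simp [hy])) hmg hnd hg
    · have hcf : st.1.contains x = false := by simpa using hc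
      have hxnm : x ∉ st.1.keys := fun hx => hc ((PySem.Dict.contains_iff_mem_keys _ _).mpr hx)
      have hd := pvDepthB_spec src.length x (src.length + 1) st.2
        (hends x (by simp)) (le_refl _) (by omega) hmg
      have hstep : pvResStep src st x
          = (st.1.insert x (pvDepthB src (src.length + 1) st.2 x).1,
             (pvDepthB src (src.length + 1) st.2 x).2) := by
        simp [pvResStep, hcf]
      have hkeys1 : (st.1.insert x (pvDepthB src (src.length + 1) st.2 x).1).keys
          = st.1.keys ++ [x] := PySem.Dict.keys_insert_of_not_contains _ _ hcf
      have hkeysadd : (st.1.insert x (pvDepthB src (src.length + 1) st.2 x).1).keys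
          = PySem.Set.add st.1.keys x := by
        rw [hkeys1, PySem.Set.add_of_not_mem hxnm]
      have hnd1 : (st.1.insert x (pvDepthB src (src.length + 1) st.2 x).1).keys.Nodup := by
        rw [hkeysadd]; exact PySem.Set.nodup_add _ _ hnd
      have hg1 : ∀ k ∈ (st.1.insert x (pvDepthB src (src.length + 1) st.2 x).1).keys,
          (st.1.insert x (pvDepthB src (src.length + 1) st.2 x).1).getD k 0 = pvValKey src k := by
        intro k hk
        rw [PySem.Dict.getD_insert]
        by_cases hkx : k = x
        · rw [if_pos hkx, hd.1, hkx]
        · rw [if_neg hkx]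
          rw [hkeys1] at hk
          rcases List.mem_append.mp hk with h | h
          · exact hg k h
          · simp at h; exact absurd h hkx
      simp only [List.foldl_cons, hstep]
      rw [hupd, ← hkeysadd]
      exact ih _ (fun y hy => hends y (by simp [hy])) hd.2 hnd1 hg1

-- every person appearing in the pedigree has a terminating chain (children by Pre_, parents one step up)
theorem pvStreamEnds {src : List (String × String)}
    (hpre : ∀ cp ∈ src, pvEnds src src.length cp.1 = true) :
    ∀ x ∈ (src.flatMap fun cp => [cp.1, cp.2]), pvEnds src src.length x = true := by
  intro x hx
  obtain ⟨cp, hcp, hm⟩ := List.mem_flatMap.mp hx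
  rcases List.mem_cons.mp hm with h | h
  · exact h ▸ hpre cp hcp
  · simp at h
    subst h
    cases hl : List.lookup cp.2 src with
    | none => exact pvEnds_of_none hl _
    | some v =>
      have := hpre (cp.2, v) (pvLookup_mem hl)
      exact this

-- ===== VERDICT (by name: the statement is the Claim_ definition above) =====
theorem get_depth_information_spec : Claim_equal_get_depth_information := by
  intro src _ hpre
  obtain ⟨hnd, hiter⟩ := hpre
  have hends : ∀ cp ∈ src, pvEnds src src.length cp.1 = true :=
    fun cp hm => (pvEnds_iff_iterate src.length cp.1).mpr (hiter cp hm)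
  unfold Spec_get_depth_information
  have hA : get_depth_information src
      = (src.foldl (fun d cp => pvWhileA src (src.length + 1) cp.1 cp.1 d)
          (src.foldl (fun d cp => (d.insert cp.1 0).insert cp.2 0) PySem.Dict.empty)).items := rfl
  have hB : get_depth_information_alt src
      = (src.foldl (fun st cp => pvResStep src (pvResStep src st cp.1) cp.2)
          (PySem.Dict.empty, PySem.Dict.empty)).1.items := rfl
  rw [hA, hB]
  rw [pvFoldPairsFlat (fun d x => d.insert x (0 : Int)) src PySem.Dict.empty]
  rw [pvFoldPairsFlat (pvResStep src) src (PySem.Dict.empty, PySem.Dict.empty)]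
  -- facts about the zero-initialised dict rd0
  have h0keys : ((src.flatMap fun cp => [cp.1, cp.2]).foldl
      (fun d x => d.insert x (0 : Int)) PySem.Dict.empty).keys
      = PySem.Set.ofList (src.flatMap fun cp => [cp.1, cp.2]) := by
    rw [PySem.Dict.keys_foldl_insert _ (fun _ _ => (0 : Int)), PySem.Dict.keys_empty,
      PySem.Set.update_nil_left]
  have h0nodup : ((src.flatMap fun cp => [cp.1, cp.2]).foldl
      (fun d x => d.insert x (0 : Int)) PySem.Dict.empty).keys.Nodup := by
    rw [h0keys]; exact PySem.Set.nodup_ofList _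
  have h0getD : ∀ k, ((src.flatMap fun cp => [cp.1, cp.2]).foldl
      (fun d x => d.insert x (0 : Int)) PySem.Dict.empty).getD k 0 = 0 :=
    pvRd0getD (src := src) _ _ (fun k => by
      rw [PySem.Dict.getD_eq_get?_getD, PySem.Dict.get?_empty]; rfl)
  -- A's outer loop
  have hsome : ∀ cp ∈ src, (List.lookup cp.1 src).isSome = true := fun cp hm => by
    rw [pvLookup_of_mem_nodup hnd hm]; rfl
  have hcont : ∀ cp ∈ src, ((src.flatMap fun cp => [cp.1, cp.2]).foldl
      (fun d x => d.insert x (0 : Int)) PySem.Dict.empty).contains cp.1 = true := by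
    intro cp hm
    rw [PySem.Dict.contains_iff_mem_keys, h0keys, PySem.Set.mem_ofList]
    exact List.mem_flatMap.mpr ⟨cp, hm, by simp⟩
  obtain ⟨hAk, hAg⟩ := pvAfold src _ hends hsome hcont h0nodup
  have hAval : ∀ k, (src.foldl (fun d cp => pvWhileA src (src.length + 1) cp.1 cp.1 d)
      ((src.flatMap fun cp => [cp.1, cp.2]).foldl
        (fun d x => d.insert x (0 : Int)) PySem.Dict.empty)).getD k 0 = pvValKey src k := by
    intro k
    rw [hAg k, h0getD k]
    by_cases hk : k ∈ src.map Prod.fst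
    · rw [List.count_eq_one_of_mem hnd hk]
      push_cast
      ring
    · rw [List.count_eq_zero_of_not_mem hk, pvValKey_of_not_key hk]
      push_cast
  -- B's outer loop
  have hMG0 : pvMemoGood src PySem.Dict.empty := by
    intro k v h
    rw [PySem.Dict.get?_empty] at h
    cases h
  obtain ⟨hBk, hBnd, hBg⟩ := pvBfold (src := src) (src.flatMap fun cp => [cp.1, cp.2])
    (PySem.Dict.empty, PySem.Dict.empty) (pvStreamEnds hends) hMG0
    PySem.Dict.nodup_keys_empty
    (by intro k hk; rw [PySem.Dict.keys_empty] at hk; exact absurd hk (List.not_mem_nil))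
  rw [PySem.Dict.keys_empty, PySem.Set.update_nil_left] at hBk
  -- both item lists are the first-occurrence person list paired with pvValKey
  rw [PySem.Dict.items_eq_map_keys _ (by rw [hAk]; exact h0nodup) 0,
    PySem.Dict.items_eq_map_keys _ hBnd 0, hAk, h0keys, hBk]
  apply List.map_congr_left
  intro k hk
  rw [hAval k, hBg k (by rw [hBk]; exact hk)]
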